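-- pv_equiv track=rewrite | github.com/carlkibler/cozempic | src/cozempic/strategies/standard.py | _collapse_diff_context
-- ===== SOURCE A (Python) =====
-- def _collapse_diff_context(diff_text: str) -> str:
--     """Strip unchanged context lines from unified diffs, keep +/- and headers."""
--     lines = diff_text.split("\n")
--     result = []
--     context_run = 0
--
--     for line in lines:
--         if line.startswith(("diff ", "---", "+++", "@@", "+", "-")):
--             if context_run > 0:
--                 result.append(f"  [...{context_run} unchanged lines...]")
--                 context_run = 0
--             result.append(line)
--         elif line.startswith(" "):
--             context_run += 1
--         else:
--             if context_run > 0: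
--                 result.append(f"  [...{context_run} unchanged lines...]")
--                 context_run = 0
--             result.append(line)
--
--     if context_run > 0:
--         result.append(f"  [...{context_run} unchanged lines...]")
--
--     collapsed = "\n".join(result)
--     return collapsed if len(collapsed) < len(diff_text) else diff_text
-- ===== SOURCE B (Python) =====
-- def _collapse_diff_context(diff_text: str) -> str:
--     """Strip unchanged context lines from unified diffs, keep +/- and headers."""
--     lines = diff_text.split("\n")
--     result = []
--     i, n = 0, len(lines)
--     while i < n:
--         # find the maximal run of lines sharing the context/non-context key
--         is_ctx = lines[i].startswith(" ")
--         j = i + 1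
--         while j < n and lines[j].startswith(" ") == is_ctx:
--             j += 1
--         if is_ctx:
--             result.append(f"  [...{j - i} unchanged lines...]")
--         else:
--             result.extend(lines[i:j])
--         i = j
--     collapsed = "\n".join(result)
--     return collapsed if len(collapsed) < len(diff_text) else diff_text
-- ===== Notes on version B (the rewrite author's own statement) =====
-- stated objective: alternative
-- what changed: Replaces the per-line state machine (context_run counter with three flush points) by two-index run-grouping: the line list is split into maximal runs keyed by whether a line starts with a space character, each context run becomes one summary line and each other run is copied verbatim; A's header/plus/minus prefix tuple disappears since none of those prefixes starts with a space.
import Mathlib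
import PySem

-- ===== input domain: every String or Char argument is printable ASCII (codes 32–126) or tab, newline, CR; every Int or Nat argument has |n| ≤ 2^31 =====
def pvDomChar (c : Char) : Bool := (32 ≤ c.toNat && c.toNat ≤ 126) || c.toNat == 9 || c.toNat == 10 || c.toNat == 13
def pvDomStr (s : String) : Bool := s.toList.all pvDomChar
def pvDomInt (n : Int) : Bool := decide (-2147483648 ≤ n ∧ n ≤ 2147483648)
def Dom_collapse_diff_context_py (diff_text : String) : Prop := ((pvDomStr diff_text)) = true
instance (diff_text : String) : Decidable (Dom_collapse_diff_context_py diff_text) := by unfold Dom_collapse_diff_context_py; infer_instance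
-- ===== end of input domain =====

-- B replaces A's per-line state machine (context_run counter + three flush points) by
-- two-index run-grouping keyed on startswith(" "); same result, same O(n) cost (objective: alternative).

-- ===== PORT A =====
def pvMsg (n : Nat) : String := "  [..." ++ Nat.repr n ++ " unchanged lines...]"

def pvIsKept (line : String) : Bool :=
  PySem.Str.startswith line "diff " || PySem.Str.startswith line "---" ||
  PySem.Str.startswith line "+++" || PySem.Str.startswith line "@@" ||
  PySem.Str.startswith line "+" || PySem.Str.startswith line "-"

def pvFlush (res : List String) (run : Nat) : List String :=
  if 0 < run then res ++ [pvMsg run] else res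

def pvStepA (st : List String × Nat) (line : String) : List String × Nat :=
  if pvIsKept line then (pvFlush st.1 st.2 ++ [line], 0)
  else if PySem.Str.startswith line " " then (st.1, st.2 + 1)
  else (pvFlush st.1 st.2 ++ [line], 0)

def collapse_diff_context_py (diff_text : String) : String :=
  let lines := (PySem.Str.split? diff_text "\n").getD []  -- split? = some _ since the separator "\n" is nonempty
  let st := lines.foldl pvStepA ([], 0)
  let result := pvFlush st.1 st.2
  let collapsed := PySem.Str.join "\n" result
  if PySem.Str.len collapsed < PySem.Str.len diff_text then collapsed else diff_text

-- ===== PORT B =====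
def pvIsCtx (line : String) : Bool := PySem.Str.startswith line " "

-- inner while loop of Source B: the maximal run with key k, and the remaining lines
def pvRun (k : Bool) : List String → List String × List String
  | [] => ([], [])
  | l :: ls =>
    if pvIsCtx l == k then
      let p := pvRun k ls
      (l :: p.1, p.2)
    else ([], l :: ls)

theorem pvRun_rest_length (k : Bool) : ∀ ls : List String, (pvRun k ls).2.length ≤ ls.length := by
  intro ls
  induction ls with
  | nil => simp [pvRun]
  | cons l ls ih =>
    by_cases h : pvIsCtx l == k
    · simpa [pvRun, h] using Nat.le_succ_of_le ih
    · simp [pvRun, h]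

-- outer while loop of Source B: process the lines run by run
def pvGroups : List String → List String
  | [] => []
  | l :: ls =>
    let p := pvRun (pvIsCtx l) ls
    (if pvIsCtx l then [pvMsg (p.1.length + 1)] else l :: p.1) ++ pvGroups p.2
termination_by ls => ls.length
decreasing_by exact Nat.lt_succ_of_le (pvRun_rest_length _ ls)

def collapse_diff_context_py_alt (diff_text : String) : String :=
  let lines := (PySem.Str.split? diff_text "\n").getD []  -- split? = some _ since the separator "\n" is nonempty
  let collapsed := PySem.Str.join "\n" (pvGroups lines)
  if PySem.Str.len collapsed < PySem.Str.len diff_text then collapsed else diff_text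

-- ===== PRECONDITION & SPEC =====
def Spec_collapse_diff_context_py (diff_text : String) (out : String) : Prop := out = collapse_diff_context_py_alt diff_text
instance (diff_text : String) (out : String) : Decidable (Spec_collapse_diff_context_py diff_text out) := by unfold Spec_collapse_diff_context_py; infer_instance

-- ===== CLAIM (what is proved, stated in full; the proofs are below) =====
def Claim_equal_collapse_diff_context_py : Prop := ∀ (diff_text : String), Dom_collapse_diff_context_py diff_text → Spec_collapse_diff_context_py diff_text (collapse_diff_context_py diff_text)

-- ===== LEMMAS AND PROOFS =====

-- a line starting with " " matches none of A's kept prefixes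
theorem pv_kept_of_ctx (l : String) (h : pvIsCtx l = true) : pvIsKept l = false := by
  have h1 := (PySem.Chars.startswith_iff l.toList " ".toList).1 (by simpa [pvIsCtx] using h)
  obtain ⟨t, ht⟩ := h1
  simp only [pvIsKept, Bool.or_eq_false_iff]
  refine ⟨⟨⟨⟨⟨?_, ?_⟩, ?_⟩, ?_⟩, ?_⟩, ?_⟩ <;>
  · rw [← Bool.not_eq_true, PySem.Str.startswith_eq]
    intro hc
    obtain ⟨u, hu⟩ := (PySem.Chars.startswith_iff _ _).1 hc
    rw [← ht] at hu
    simp at hu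

theorem pvRun_cons_eq (k : Bool) (x : String) (xs : List String) (h : pvIsCtx x = k) :
    pvRun k (x :: xs) = (x :: (pvRun k xs).1, (pvRun k xs).2) := by
  simp [pvRun, h]

theorem pvRun_cons_ne (k : Bool) (x : String) (xs : List String) (h : ¬ pvIsCtx x = k) :
    pvRun k (x :: xs) = ([], x :: xs) := by
  simp [pvRun, h]

theorem pvGroups_cons_not_ctx (l : String) (ls : List String) (h : pvIsCtx l = false) :
    pvGroups (l :: ls) = l :: pvGroups ls := by
  rw [pvGroups]
  simp only [h, if_neg Bool.false_ne_true]
  cases ls with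
  | nil => simp [pvRun, pvGroups]
  | cons x xs =>
    by_cases hx : pvIsCtx x = false
    · rw [pvRun_cons_eq false x xs hx]
      conv_rhs => rw [pvGroups]
      simp [hx]
    · rw [pvRun_cons_ne false x xs (by simpa using hx)]
      simp

theorem pvGroups_cons_ctx (l : String) (ls : List String) (h : pvIsCtx l = true) :
    pvGroups (l :: ls) =
      pvMsg ((pvRun true ls).1.length + 1) :: pvGroups (pvRun true ls).2 := by
  rw [pvGroups]
  simp [h]

theorem pvMain (ls : List String) : ∀ (res : List String) (c : Nat),
    pvFlush (ls.foldl pvStepA (res, c)).1 (ls.foldl pvStepA (res, c)).2 =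
      if 0 < c then
        res ++ [pvMsg (c + (pvRun true ls).1.length)] ++ pvGroups (pvRun true ls).2
      else res ++ pvGroups ls := by
  induction ls with
  | nil =>
    intro res c
    by_cases hc : 0 < c <;> simp [pvFlush, pvRun, pvGroups, hc]
  | cons x xs ih =>
    intro res c
    by_cases hx : pvIsCtx x = true
    · have hk := pv_kept_of_ctx x hx
      have hstep : pvStepA (res, c) x = (res, c + 1) := by
        have hx2 : PySem.Chars.startswith x.toList [' '] = true := by
          simpa [pvIsCtx] using hx
        simp [pvStepA, hk, hx2]
      rw [List.foldl_cons, hstep, ih res (c + 1)]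
      rw [pvRun_cons_eq true x xs hx]
      by_cases hc : 0 < c
      · have harith : c + 1 + (pvRun true xs).1.length = c + ((pvRun true xs).1.length + 1) := by omega
        simp [hc, harith]
      · have hc0 : c = 0 := by omega
        subst hc0
        rw [pvGroups_cons_ctx x xs hx]
        simp [Nat.add_comm]
    · have hx' : pvIsCtx x = false := by simpa using hx
      have hstep : pvStepA (res, c) x = (pvFlush res c ++ [x], 0) := by
        by_cases hk : pvIsKept x
        · simp [pvStepA, hk]
        · have hx2 : PySem.Chars.startswith x.toList [' '] = false := by
            simpa [pvIsCtx] using hx'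
          simp [pvStepA, hk, hx2]
      rw [List.foldl_cons, hstep, ih (pvFlush res c ++ [x]) 0]
      rw [pvRun_cons_ne true x xs (by simp [hx'])]
      rw [pvGroups_cons_not_ctx x xs hx']
      by_cases hc : 0 < c <;> simp [pvFlush, hc]

-- ===== VERDICT (by name: the statement is the Claim_ definition above) =====
theorem collapse_diff_context_py_spec : Claim_equal_collapse_diff_context_py := by
  intro diff_text _
  show _ = _
  unfold collapse_diff_context_py collapse_diff_context_py_alt
  have h := pvMain ((PySem.Str.split? diff_text "\n").getD []) [] 0
  simp only [Nat.lt_irrefl, if_false, List.nil_append] at h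
  simp only [h]
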